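-- pv_equiv track=rewrite | github.com/TenmonAI/tenmon-ark | api/automation/chatts_metrics_v1.py | compute_split_blocks
-- ===== SOURCE A (Python) =====
-- from typing import Any, Dict, List, Optional, Set, Tuple
--
-- def compute_split_blocks(line_count: int, max_blocks: int = 10) -> List[Tuple[int, int]]:
--     if line_count <= 0:
--         return []
--     n = min(max_blocks, max(1, line_count // 200))
--     n = min(n, line_count)
--     size = max(1, (line_count + n - 1) // n)
--     blocks: List[Tuple[int, int]] = []
--     start = 1
--     while start <= line_count and len(blocks) < max_blocks:
--         end = min(line_count, start + size - 1)
--         blocks.append((start, end))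
--         start = end + 1
--     return blocks[:max_blocks]
-- ===== SOURCE B (Python) =====
-- def compute_split_blocks(line_count: int, max_blocks: int = 10):
--     if line_count <= 0 or max_blocks <= 0:
--         return []
--     n = min(max_blocks, max(1, line_count // 200), line_count)
--     size = max(1, (line_count + n - 1) // n)
--     blocks = []
--     end = line_count
--     while end > 0:
--         start = ((end - 1) // size) * size + 1
--         blocks.append((start, end))
--         end = start - 1
--     blocks.reverse()
--     return blocks
-- ===== Notes on version B (the rewrite author's own statement) =====
-- stated objective: alternative
-- what changed: B builds the blocks back-to-front: it walks from line_count down to 1, computing each block's start by rounding the current end down to the previous size-boundary ((end-1)//size*size+1), appends blocks in descending order and reverses once; A's forward walk with a start accumulator, the max_blocks cap and the final slice are gone (the cap is proved dead).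
import Mathlib
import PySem

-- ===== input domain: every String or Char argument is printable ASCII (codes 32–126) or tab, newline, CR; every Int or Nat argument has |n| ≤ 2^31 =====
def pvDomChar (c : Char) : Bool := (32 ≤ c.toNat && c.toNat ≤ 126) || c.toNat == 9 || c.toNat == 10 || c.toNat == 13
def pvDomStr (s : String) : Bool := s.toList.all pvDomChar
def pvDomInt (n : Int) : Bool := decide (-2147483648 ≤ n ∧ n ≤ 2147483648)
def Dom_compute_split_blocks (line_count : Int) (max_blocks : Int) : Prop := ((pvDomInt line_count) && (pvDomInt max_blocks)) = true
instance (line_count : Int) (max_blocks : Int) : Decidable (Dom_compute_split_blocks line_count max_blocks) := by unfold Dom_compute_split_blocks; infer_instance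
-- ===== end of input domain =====

-- B builds the block list back-to-front (each start obtained by rounding the current end
-- down to a size-boundary) and reverses once, instead of A's forward walk with a start
-- accumulator, max_blocks cap and final slice; alternative decomposition, same cost.

-- ===== PORT A =====
-- A's while loop: state is (blocks, start); measured by (max_blocks - len(blocks)).
def pvLoopA (line_count size max_blocks : Int) (blocks : List (Int × Int)) (start : Int) :
    List (Int × Int) :=
  if h : start ≤ line_count ∧ (blocks.length : Int) < max_blocks then
    pvLoopA line_count size max_blocks
      (blocks ++ [(start, min line_count (start + size - 1))])
      (min line_count (start + size - 1) + 1)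
  else blocks
termination_by (max_blocks - blocks.length).toNat
decreasing_by simp only [List.length_append, List.length_cons, List.length_nil]; omega

def compute_split_blocks (line_count : Int) (max_blocks : Int) : List (Int × Int) :=
  if line_count ≤ 0 then []
  else
    let n := min max_blocks (max 1 (PySem.Int.floordiv line_count 200))
    let n2 := min n line_count
    let size := max 1 (PySem.Int.floordiv (line_count + n2 - 1) n2)
    let blocks := pvLoopA line_count size max_blocks [] 1
    PySem.List.slice blocks none (some max_blocks)

-- ===== PORT B =====
-- B's backward while loop: state is (blocks, end); the '0 < size' guard is a totality
-- guard only (every call site has size ≥ 1, where the Python loop terminates).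
def pvLoopB (size : Int) (blocks : List (Int × Int)) (e : Int) : List (Int × Int) :=
  if h : 0 < e ∧ 0 < size then
    pvLoopB size (blocks ++ [(PySem.Int.floordiv (e - 1) size * size + 1, e)])
      (PySem.Int.floordiv (e - 1) size * size)
  else blocks
termination_by e.toNat
decreasing_by
  have h2 : PySem.Int.floordiv (e - 1) size = (e - 1) / size :=
    PySem.Int.floordiv_eq_ediv_of_pos h.2
  have h3 : (e - 1) / size * size ≤ e - 1 := Int.ediv_mul_le (e - 1) (ne_of_gt h.2)
  have h4 : PySem.Int.floordiv (e - 1) size * size ≤ e - 1 := by rw [h2]; exact h3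
  have h5 := h.1
  omega

def compute_split_blocks_alt (line_count : Int) (max_blocks : Int) : List (Int × Int) :=
  if line_count ≤ 0 ∨ max_blocks ≤ 0 then []
  else
    let n := min (min max_blocks (max 1 (PySem.Int.floordiv line_count 200))) line_count
    let size := max 1 (PySem.Int.floordiv (line_count + n - 1) n)
    (pvLoopB size [] line_count).reverse

-- ===== PRECONDITION & SPEC =====
-- Pre_ excludes only the inputs where A raises ZeroDivisionError (n = min(0, …) = 0).
def Pre_compute_split_blocks (line_count : Int) (max_blocks : Int) : Prop :=
  ¬ (0 < line_count ∧ max_blocks = 0)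
instance (line_count : Int) (max_blocks : Int) : Decidable (Pre_compute_split_blocks line_count max_blocks) := by unfold Pre_compute_split_blocks; infer_instance
def pvWitness_compute_split_blocks : Int × Int := (450, 10)

def Spec_compute_split_blocks (line_count : Int) (max_blocks : Int) (out : List (Int × Int)) : Prop := out = compute_split_blocks_alt line_count max_blocks
instance (line_count : Int) (max_blocks : Int) (out : List (Int × Int)) : Decidable (Spec_compute_split_blocks line_count max_blocks out) := by unfold Spec_compute_split_blocks; infer_instance

-- ===== CLAIM (what is proved, stated in full; the proofs are below) =====
def Claim_equal_compute_split_blocks : Prop := ∀ (line_count : Int) (max_blocks : Int), Dom_compute_split_blocks line_count max_blocks → Pre_compute_split_blocks line_count max_blocks → Spec_compute_split_blocks line_count max_blocks (compute_split_blocks line_count max_blocks)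

-- ===== LEMMAS AND PROOFS =====

-- ceiling-division bracket: a ≤ ((a+b-1)/b)*b < a+b for 0 < b
lemma pvCeilBounds (a b : Int) (hb : 0 < b) :
    a ≤ ((a + b - 1) / b) * b ∧ ((a + b - 1) / b) * b < a + b := by
  have h := Int.ediv_add_emod (a + b - 1) b
  have h1 := Int.emod_nonneg (a + b - 1) (ne_of_gt hb)
  have h2 := Int.emod_lt_of_pos (a + b - 1) hb
  constructor <;> nlinarith [h, h1, h2]

lemma pvLoopA_stop (lc size mb : Int) (blocks : List (Int × Int)) (start : Int)
    (h : ¬ (start ≤ lc ∧ (blocks.length : Int) < mb)) :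
    pvLoopA lc size mb blocks start = blocks := by
  rw [pvLoopA, dif_neg h]

lemma pvLoopA_step (lc size mb : Int) (blocks : List (Int × Int)) (start : Int)
    (h : start ≤ lc ∧ (blocks.length : Int) < mb) :
    pvLoopA lc size mb blocks start =
      pvLoopA lc size mb (blocks ++ [(start, min lc (start + size - 1))])
        (min lc (start + size - 1) + 1) := by
  rw [pvLoopA, dif_pos h]

-- A's loop, started at start = 1 + k*size with len(blocks) = k, produces exactly
-- one block per i ∈ [k, count)
lemma pvLoopA_eq (lc size mb count : Int) (hsize : 1 ≤ size)
    (h2 : lc ≤ count * size) (h3 : (count - 1) * size < lc) (hcm : count ≤ mb) :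
    ∀ (k : Int) (blocks : List (Int × Int)), 0 ≤ k → k ≤ count →
      (blocks.length : Int) = k →
      pvLoopA lc size mb blocks (1 + k * size) =
        blocks ++ (PySem.List.pyRange k count 1).map
          (fun i => (1 + i * size, min lc ((i + 1) * size))) := by
  intro k
  induction' hind : (count - k).toNat using Nat.strong_induction_on with m ih generalizing k
  intro blocks hk0 hkc hlen
  rcases eq_or_lt_of_le hkc with heq | hlt
  · subst heq
    rw [pvLoopA_stop _ _ _ _ _ (by intro h; exfalso; omega),
      PySem.List.pyRange_one_eq_nil le_rfl]
    simp
  · have hklast : k * size ≤ (count - 1) * size :=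
      mul_le_mul_of_nonneg_right (by omega) (by omega)
    have hstart : 1 + k * size ≤ lc := by omega
    have hguard : (blocks.length : Int) < mb := by omega
    rw [pvLoopA_step _ _ _ _ _ ⟨hstart, hguard⟩]
    have hmin : min lc (1 + k * size + size - 1) = min lc ((k + 1) * size) := by
      ring_nf
    rw [hmin]
    rw [PySem.List.pyRange_one_cons hlt]
    rcases eq_or_lt_of_le (show k + 1 ≤ count by omega) with heq1 | hlt1
    · have hminlc : min lc ((k + 1) * size) = lc := by
        rw [heq1]; exact min_eq_left h2
      rw [pvLoopA_stop _ _ _ _ _ (by rw [hminlc]; intro h; exfalso; omega)]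
      rw [PySem.List.pyRange_one_eq_nil (by omega)]
      simp
    · have hnext : (k + 1) * size ≤ (count - 1) * size :=
        mul_le_mul_of_nonneg_right (by omega) (by omega)
      have hminv : min lc ((k + 1) * size) = (k + 1) * size :=
        min_eq_right (le_trans hnext h3.le)
      have := ih (count - (k + 1)).toNat (by omega) (k + 1) rfl
        (blocks ++ [(1 + k * size, min lc ((k + 1) * size))])
        (by omega) (by omega) (by simp [hlen])
      rw [hminv] at this ⊢
      rw [show (k + 1) * size + 1 = 1 + (k + 1) * size by ring]
      rw [this]
      simp [hminv]

lemma pvLoopB_stop (size : Int) (blocks : List (Int × Int)) (e : Int)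
    (h : ¬ (0 < e ∧ 0 < size)) : pvLoopB size blocks e = blocks := by
  rw [pvLoopB, dif_neg h]

lemma pvLoopB_step (size : Int) (blocks : List (Int × Int)) (e : Int)
    (h : 0 < e ∧ 0 < size) :
    pvLoopB size blocks e =
      pvLoopB size (blocks ++ [(PySem.Int.floordiv (e - 1) size * size + 1, e)])
        (PySem.Int.floordiv (e - 1) size * size) := by
  rw [pvLoopB, dif_pos h]

-- B's loop started at a multiple m*size of the block size emits the m blocks below it,
-- in descending order.
lemma pvLoopB_eq (size : Int) (hsz : 1 ≤ size) :
    ∀ (m : Nat) (blocks : List (Int × Int)),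
      pvLoopB size blocks ((m : Int) * size) =
        blocks ++ ((PySem.List.pyRange 0 (m : Int) 1).map
          (fun i => (1 + i * size, (i + 1) * size))).reverse := by
  intro m
  induction m with
  | zero =>
    intro blocks
    rw [pvLoopB_stop _ _ _ (by intro h; simp at h)]
    simp [PySem.List.pyRange_one_eq_nil le_rfl]
  | succ p ih =>
    intro blocks
    have hc : ((p + 1 : Nat) : Int) = (p : Int) + 1 := by push_cast; ring
    rw [hc]
    have he : (0 : Int) < ((p : Int) + 1) * size := by positivity
    rw [pvLoopB_step _ _ _ ⟨he, by omega⟩]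
    have hfd : PySem.Int.floordiv (((p : Int) + 1) * size - 1) size = (p : Int) := by
      rw [PySem.Int.floordiv_eq_iff_of_pos (by omega)]
      constructor <;> nlinarith
    rw [hfd, show (p : Int) * size + 1 = 1 + (p : Int) * size from by ring]
    rw [ih]
    rw [show ((p : Int) + 1) = ((p : Nat) : Int) + 1 from rfl,
      PySem.List.pyRange_one_succ_right (by positivity)]
    simp [List.map_append, List.reverse_append]

theorem compute_split_blocks_spec : Claim_equal_compute_split_blocks := by
  unfold Claim_equal_compute_split_blocks Spec_compute_split_blocks
  intro lc mb _hdom hpre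
  unfold Pre_compute_split_blocks at hpre
  unfold compute_split_blocks compute_split_blocks_alt
  dsimp only
  by_cases hlc : lc ≤ 0
  · simp [hlc]
  · push_neg at hlc
    rw [if_neg (by omega)]
    by_cases hmb : mb ≤ 0
    · have hmbneg : mb < 0 := by omega
      rw [if_pos (Or.inr hmb)]
      rw [pvLoopA, dif_neg (by push_neg; intro _; omega)]
      simp [PySem.List.slice]
    · push_neg at hmb
      rw [if_neg (by omega)]
      set n2 : Int := min (min mb (max 1 (PySem.Int.floordiv lc 200))) lc with hn2
      have hn2pos : 1 ≤ n2 := by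
        have : (1 : Int) ≤ max 1 (PySem.Int.floordiv lc 200) := le_max_left _ _
        simp only [hn2, le_min_iff]; omega
      have hn2mb : n2 ≤ mb := le_trans (min_le_left _ _) (min_le_left _ _)
      rw [PySem.Int.floordiv_eq_ediv_of_pos (b := n2) (by omega)]
      set size : Int := max 1 ((lc + n2 - 1) / n2) with hsizedef
      have hsz : 1 ≤ size := le_max_left _ _
      have hsizeq : (lc + n2 - 1) / n2 ≤ size := le_max_right _ _
      have hcb := pvCeilBounds lc n2 (by omega)
      have hnsz : lc ≤ n2 * size := by
        calc lc ≤ ((lc + n2 - 1) / n2) * n2 := hcb.1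
        _ ≤ size * n2 := mul_le_mul_of_nonneg_right hsizeq (by omega)
        _ = n2 * size := mul_comm _ _
      -- count = ceil(lc / size), the number of blocks both loops emit
      set count : Int := (lc + size - 1) / size with hcount
      have hcb2 := pvCeilBounds lc size (by omega)
      have h2 : lc ≤ count * size := hcb2.1
      have h3 : (count - 1) * size < lc := by
        have := hcb2.2; nlinarith
      have hcn2 : count ≤ n2 := by
        by_contra hgt
        push_neg at hgt
        have : n2 * size ≤ (count - 1) * size :=
          mul_le_mul_of_nonneg_right (by omega) (by omega)
        omega
      have hcm : count ≤ mb := le_trans hcn2 hn2mb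
      have hcpos : 1 ≤ count := by nlinarith [h2, h3]
      -- A's side: the forward loop emits block i for i ∈ [0, count), and the slice is dead
      have hloop := pvLoopA_eq lc size mb count hsz h2 h3 hcm 0 [] le_rfl
        (by omega) (by simp)
      rw [show (1 : Int) + 0 * size = 1 by ring] at hloop
      rw [hloop]
      simp only [List.nil_append]
      rw [PySem.List.slice_to _ (by omega : (0:Int) ≤ mb)]
      rw [List.take_of_length_le
        (by rw [List.length_map, PySem.List.length_pyRange_one]; omega)]
      -- B's side: one unrolling (the top block ends at lc), then pvLoopB_eq from (count-1)*size
      have hfd : PySem.Int.floordiv (lc - 1) size = count - 1 := by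
        rw [PySem.Int.floordiv_eq_iff_of_pos (by omega)]
        constructor <;> nlinarith
      rw [pvLoopB_step _ _ _ ⟨by omega, by omega⟩, hfd]
      have hm : ((count - 1).toNat : Int) = count - 1 := Int.toNat_of_nonneg (by omega)
      rw [show (count - 1) * size = ((count - 1).toNat : Int) * size by rw [hm]]
      rw [pvLoopB_eq size hsz (count - 1).toNat]
      rw [hm]
      simp only [List.nil_append, List.reverse_append, List.reverse_reverse,
        List.reverse_cons, List.reverse_nil, List.nil_append]
      -- split A's range at count-1 and identify the two pieces
      rw [PySem.List.pyRange_one_append 0 (count - 1) count (by omega) (by omega)]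
      rw [List.map_append]
      congr 1
      · apply List.map_congr_left
        intro i hi
        rw [PySem.List.mem_pyRange_one] at hi
        have : (i + 1) * size ≤ (count - 1) * size :=
          mul_le_mul_of_nonneg_right (by omega) (by omega)
        have hmv : min lc ((i + 1) * size) = (i + 1) * size :=
          min_eq_right (by omega)
        simp [hmv]
      · have hsing : PySem.List.pyRange (count - 1) count 1 = [count - 1] := by
          have h := PySem.List.pyRange_one_singleton (count - 1)
          rw [show count - 1 + 1 = count from by ring] at h
          exact h
        rw [hsing]
        simp only [List.map_cons, List.map_nil]
        simp
        exact ⟨by ring, h2⟩
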